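-- pv_equiv track=rewrite | github.com/mnhkhadang/bmttnc-hutech-2280601353 | Lab_2/cipher/playfair/playfair_cipher.py | preprocess_plain_text
-- ===== SOURCE A (Python) =====
-- def preprocess_plain_text(text):
--     text = text.upper().replace("J", "I")
--     result = ""
--     i = 0
--     while i < len(text):
--         a = text[i]
--         b = text[i + 1] if i + 1 < len(text) else 'X'
--
--         if a == b:
--             result += a + 'X'
--             i += 1
--         else:
--             result += a + b
--             i += 2
--
--     if len(result) % 2 != 0:
--         result += 'X'
--     return result
-- ===== SOURCE B (Python) =====
-- def preprocess_plain_text(text):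
--     text = text.upper().replace("J", "I")
--     result = []
--     pending = None
--     for c in text:
--         if pending is None:
--             pending = c
--         elif pending == c:
--             result.append(pending + 'X')
--         else:
--             result.append(pending + c)
--             pending = None
--     if pending is not None:
--         result.append(pending + 'X')
--     return "".join(result)
-- ===== Notes on version B (the rewrite author's own statement) =====
-- stated objective: faster
-- what changed: Replaces the variable-stride index while-loop with quadratic string concatenation by a single for-each pass maintaining a pending-character state, collecting digraphs in a list joined once; the always-even output makes A's final parity guard disappear.
import Mathlib
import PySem

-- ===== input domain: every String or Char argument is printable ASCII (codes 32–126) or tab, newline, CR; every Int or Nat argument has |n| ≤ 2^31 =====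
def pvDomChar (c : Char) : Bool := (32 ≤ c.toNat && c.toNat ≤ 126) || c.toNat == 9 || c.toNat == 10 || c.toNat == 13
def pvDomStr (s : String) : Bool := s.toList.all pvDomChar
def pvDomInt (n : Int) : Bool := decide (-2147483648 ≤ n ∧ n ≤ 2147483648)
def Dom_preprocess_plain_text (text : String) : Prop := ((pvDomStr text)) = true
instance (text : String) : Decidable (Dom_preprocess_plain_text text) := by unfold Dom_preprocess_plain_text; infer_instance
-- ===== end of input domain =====

-- B rewrites A's variable-stride index loop (quadratic string concatenation) as a single for-each
-- pass with a pending-character state, joining a digraph list once (measured faster by the check).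

-- ===== PORT A =====
-- A's while-loop over index i, accumulating `result` (as a List Char).
def pvALoop (t : List Char) (i : Nat) (result : List Char) : List Char :=
  if h : i < t.length then
    let a := t[i]
    let b := if h2 : i + 1 < t.length then t[i+1] else 'X'
    if a == b then pvALoop t (i + 1) (result ++ [a, 'X'])
    else pvALoop t (i + 2) (result ++ [a, b])
  else result
termination_by t.length - i

def preprocess_plain_text (text : String) : String :=
  let t := (PySem.Str.replace (PySem.Str.upper text) "J" "I").toList
  let result := pvALoop t 0 []
  let result := if result.length % 2 ≠ 0 then result ++ ['X'] else result
  String.mk result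

-- ===== PORT B =====
-- B's for-each loop: pending holds the first char of an incomplete pair; digraphs collected in a list.
def pvBLoop (pending : Option Char) (cs : List Char) (acc : List (List Char)) : List (List Char) :=
  match cs with
  | [] =>
    match pending with
    | none => acc
    | some p => acc ++ [[p, 'X']]
  | c :: rest =>
    match pending with
    | none => pvBLoop (some c) rest acc
    | some p =>
      if p == c then pvBLoop (some c) rest (acc ++ [[p, 'X']])
      else pvBLoop none rest (acc ++ [[p, c]])

def preprocess_plain_text_alt (text : String) : String :=
  let t := (PySem.Str.replace (PySem.Str.upper text) "J" "I").toList
  String.mk (pvBLoop none t []).flatten   -- "".join(result)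

-- ===== PRECONDITION & SPEC =====
def Spec_preprocess_plain_text (text : String) (out : String) : Prop := out = preprocess_plain_text_alt text
instance (text : String) (out : String) : Decidable (Spec_preprocess_plain_text text out) := by unfold Spec_preprocess_plain_text; infer_instance

-- ===== CLAIM (what is proved, stated in full; the proofs are below) =====
def Claim_equal_preprocess_plain_text : Prop := ∀ (text : String), Dom_preprocess_plain_text text → Spec_preprocess_plain_text text (preprocess_plain_text text)

-- ===== LEMMAS AND PROOFS =====
-- Reference digraph function both loops compute.
def pvF : List Char → List Char
  | [] => []
  | [a] => [a, 'X']
  | a :: b :: rest => if a == b then [a, 'X'] ++ pvF (b :: rest) else [a, b] ++ pvF rest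

theorem pvF_len_even (cs : List Char) : (pvF cs).length % 2 = 0 := by
  fun_induction pvF cs <;> simp_all [pvF] <;> omega

theorem pvALoop_eq (t : List Char) (i : Nat) (result : List Char) :
    pvALoop t i result = result ++ pvF (t.drop i) := by
  fun_induction pvALoop t i result with
  | case1 i result h a b hab ih =>
    rw [ih]
    have hd : t.drop i = t[i] :: t.drop (i+1) := List.drop_eq_getElem_cons h
    by_cases h2 : i + 1 < t.length
    · have hd2 : t.drop (i+1) = t[i+1] :: t.drop (i+2) := List.drop_eq_getElem_cons h2
      simp only [a, b, dif_pos h2] at hab ⊢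
      rw [hd, hd2, pvF]
      simp [hab]
    · have hd2 : t.drop (i+1) = ([] : List Char) := List.drop_eq_nil_of_le (by omega)
      simp only [a, b, dif_neg h2] at hab ⊢
      rw [hd, hd2]
      simp [pvF]
  | case2 i result h a b hab ih =>
    rw [ih]
    have hd : t.drop i = t[i] :: t.drop (i+1) := List.drop_eq_getElem_cons h
    by_cases h2 : i + 1 < t.length
    · have hd2 : t.drop (i+1) = t[i+1] :: t.drop (i+2) := List.drop_eq_getElem_cons h2
      simp only [a, b, dif_pos h2] at hab ⊢
      rw [hd, hd2, pvF]
      simp [hab]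
    · have hd3 : t.drop (i+2) = ([] : List Char) := List.drop_eq_nil_of_le (by omega)
      simp only [a, b, dif_neg h2] at hab ⊢
      rw [hd, hd3]
      have hd2 : t.drop (i+1) = ([] : List Char) := List.drop_eq_nil_of_le (by omega)
      rw [hd2]
      simp [pvF]
  | case3 i result h =>
    have hd : t.drop i = ([] : List Char) := List.drop_eq_nil_of_le (by omega)
    simp [hd, pvF]

theorem pvBLoop_eq (cs : List Char) (pending : Option Char) (acc : List (List Char)) :
    (pvBLoop pending cs acc).flatten =
      acc.flatten ++ pvF (match pending with | none => cs | some p => p :: cs) := by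
  induction cs generalizing pending acc with
  | nil =>
    cases pending <;> simp [pvBLoop, pvF]
  | cons c rest ih =>
    cases pending with
    | none => simpa [pvBLoop] using ih (some c) acc
    | some p =>
      by_cases hpc : p = c
      · subst hpc
        simp only [pvBLoop, beq_self_eq_true, if_pos]
        rw [ih (some p)]
        simp [pvF]
      · have hb : (p == c) = false := beq_false_of_ne hpc
        simp only [pvBLoop, hb, Bool.false_eq_true, if_neg, not_false_iff]
        rw [ih none]
        simp [pvF, hb]

theorem pvKey (t : List Char) :
    String.mk (if (pvALoop t 0 []).length % 2 ≠ 0 then pvALoop t 0 [] ++ ['X']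
               else pvALoop t 0 []) = String.mk (pvBLoop none t []).flatten := by
  rw [pvALoop_eq, pvBLoop_eq]
  simp [pvF_len_even]

-- ===== VERDICT (by name: the statement is the Claim_ definition above) =====
theorem preprocess_plain_text_spec : Claim_equal_preprocess_plain_text := by
  intro text _
  exact pvKey _
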